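-- pv_equiv track=rewrite | github.com/nicolasenriquez/omnibid | backend/api/routers/opportunities.py | _relationship_summary
-- ===== SOURCE A (Python) =====
-- from typing import Any, cast
--
-- def _relationship_summary(lines: list[dict[str, Any]]) -> str:
--     certainties = {line.get("relationshipCertainty") for line in lines}
--     if "low" in certainties:
--         return "low"
--     if "medium" in certainties:
--         return "medium"
--     if "none" in certainties:
--         return "none"
--     return "unconfirmed"
-- ===== SOURCE B (Python) =====
-- def _relationship_summary(lines):
--     rank = 3
--     mapping = {"low": 0, "medium": 1, "none": 2}
--     for line in lines:
--         rank = min(rank, mapping.get(line.get("relationshipCertainty"), 3))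
--     return {0: "low", 1: "medium", 2: "none"}.get(rank, "unconfirmed")
-- ===== Notes on version B (the rewrite author's own statement) =====
-- stated objective: alternative
-- what changed: Replaces the set comprehension plus three membership-test returns by a single pass keeping a running minimum priority rank (via a rank map), then inverts the rank to its name.
import Mathlib
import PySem

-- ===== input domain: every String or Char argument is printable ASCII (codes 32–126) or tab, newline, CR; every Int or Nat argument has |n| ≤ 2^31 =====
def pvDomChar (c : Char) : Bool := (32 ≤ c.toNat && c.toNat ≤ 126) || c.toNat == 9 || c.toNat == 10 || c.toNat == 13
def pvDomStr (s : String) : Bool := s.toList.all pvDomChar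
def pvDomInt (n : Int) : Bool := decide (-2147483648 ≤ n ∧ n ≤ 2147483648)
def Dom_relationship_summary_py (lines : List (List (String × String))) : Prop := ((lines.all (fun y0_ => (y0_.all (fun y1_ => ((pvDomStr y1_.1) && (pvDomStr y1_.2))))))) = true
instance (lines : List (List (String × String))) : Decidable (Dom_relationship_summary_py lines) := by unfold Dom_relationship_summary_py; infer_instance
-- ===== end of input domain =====

-- B replaces A's set comprehension + three membership-test returns by a single pass
-- keeping the running minimum priority rank; same O(n) cost, different decomposition.

-- ===== PORT A =====
def relationship_summary_py (lines : List (List (String × String))) : String :=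
  let certainties : PySem.Set (Option String) :=
    PySem.Set.ofList (lines.map (fun line => (PySem.Dict.mk line).get? "relationshipCertainty"))
  if certainties.contains (some "low") then "low"
  else if certainties.contains (some "medium") then "medium"
  else if certainties.contains (some "none") then "none"
  else "unconfirmed"

-- ===== PORT B =====
-- mapping.get(line.get("relationshipCertainty"), 3): a missing key gives None, and
-- None is not a key of mapping, so the default 3 applies.
def rsRank (c : Option String) : Int :=
  match c with
  | none => 3
  | some s => (PySem.Dict.ofList [("low", (0:Int)), ("medium", 1), ("none", 2)]).getD s 3

def relationship_summary_py_alt (lines : List (List (String × String))) : String :=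
  let rank : Int :=
    lines.foldl (fun r line => min r (rsRank ((PySem.Dict.mk line).get? "relationshipCertainty"))) 3
  (PySem.Dict.ofList [((0:Int), "low"), (1, "medium"), (2, "none")]).getD rank "unconfirmed"

-- ===== PRECONDITION & SPEC =====
def Spec_relationship_summary_py (lines : List (List (String × String))) (out : String) : Prop := out = relationship_summary_py_alt lines
instance (lines : List (List (String × String))) (out : String) : Decidable (Spec_relationship_summary_py lines out) := by unfold Spec_relationship_summary_py; infer_instance

-- ===== CLAIM (what is proved, stated in full; the proofs are below) =====
def Claim_equal_relationship_summary_py : Prop := ∀ (lines : List (List (String × String))), Dom_relationship_summary_py lines → Spec_relationship_summary_py lines (relationship_summary_py lines)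

-- ===== LEMMAS AND PROOFS =====

def rsGetC (line : List (String × String)) : Option String :=
  (PySem.Dict.mk line).get? "relationshipCertainty"

lemma rsRank_eq (c : Option String) :
    rsRank c = if c = some "low" then 0 else if c = some "medium" then 1
               else if c = some "none" then 2 else 3 := by
  cases c with
  | none => simp [rsRank]
  | some s =>
    by_cases h1 : s = "low" <;> by_cases h2 : s = "medium" <;> by_cases h3 : s = "none" <;>
      simp_all [rsRank, PySem.Dict.ofList, PySem.Dict.update,
        PySem.Dict.getD_insert, PySem.Dict.getD_empty]

lemma rsRank_nonneg (c : Option String) : 0 ≤ rsRank c := by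
  rw [rsRank_eq]; split_ifs <;> omega

lemma rs_foldl_le_iff (lines : List (List (String × String))) (a c : Int) :
    lines.foldl (fun r line => min r (rsRank (rsGetC line))) a ≤ c ↔
      a ≤ c ∨ ∃ l ∈ lines, rsRank (rsGetC l) ≤ c := by
  induction lines generalizing a with
  | nil => simp
  | cons x xs ih =>
    simp only [List.foldl_cons, ih, min_le_iff, List.mem_cons]
    constructor
    · rintro (⟨h | h⟩ | ⟨l, hl, hr⟩)
      · exact Or.inl h
      · exact Or.inr ⟨x, Or.inl rfl, h⟩
      · exact Or.inr ⟨l, Or.inr hl, hr⟩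
    · rintro (h | ⟨l, (rfl | hl), hr⟩)
      · exact Or.inl (Or.inl h)
      · exact Or.inl (Or.inr hr)
      · exact Or.inr ⟨l, hl, hr⟩

lemma rs_foldl_nonneg (lines : List (List (String × String))) (a : Int) (ha : 0 ≤ a) :
    0 ≤ lines.foldl (fun r line => min r (rsRank (rsGetC line))) a := by
  induction lines generalizing a with
  | nil => simpa
  | cons x xs ih => exact ih _ (le_min ha (rsRank_nonneg _))

lemma rsRank_le_iff (c : Option String) :
    (rsRank c ≤ 0 ↔ c = some "low") ∧
    (rsRank c ≤ 1 ↔ c = some "low" ∨ c = some "medium") ∧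
    (rsRank c ≤ 2 ↔ c = some "low" ∨ c = some "medium" ∨ c = some "none") := by
  rw [rsRank_eq]; split_ifs <;> simp_all

lemma rs_inv_getD (m : Int) :
    (PySem.Dict.ofList [((0:Int), "low"), (1, "medium"), (2, "none")]).getD m "unconfirmed" =
      if m = 0 then "low" else if m = 1 then "medium" else if m = 2 then "none"
      else "unconfirmed" := by
  by_cases h0 : m = 0 <;> by_cases h1 : m = 1 <;> by_cases h2 : m = 2 <;>
    simp_all [PySem.Dict.ofList, PySem.Dict.update,
      PySem.Dict.getD_insert, PySem.Dict.getD_empty]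

-- ===== VERDICT (by name: the statement is the Claim_ definition above) =====
theorem relationship_summary_py_spec : Claim_equal_relationship_summary_py := by
  intro lines _
  unfold Spec_relationship_summary_py relationship_summary_py relationship_summary_py_alt
  simp only [PySem.Set.contains_eq_listContains]
  set m : Int := lines.foldl (fun r line => min r (rsRank ((PySem.Dict.mk line).get? "relationshipCertainty"))) 3 with hm
  have hm' : m = lines.foldl (fun r line => min r (rsRank (rsGetC line))) 3 := by
    simp [hm, rsGetC]
  have h0 : m ≤ 0 ↔ ∃ l ∈ lines, rsGetC l = some "low" := by
    rw [hm', rs_foldl_le_iff]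
    constructor
    · rintro (h | ⟨l, hl, hr⟩)
      · omega
      · exact ⟨l, hl, ((rsRank_le_iff _).1).mp hr⟩
    · rintro ⟨l, hl, hr⟩
      exact Or.inr ⟨l, hl, ((rsRank_le_iff _).1).mpr hr⟩
  have h1 : m ≤ 1 ↔ ∃ l ∈ lines, rsGetC l = some "low" ∨ rsGetC l = some "medium" := by
    rw [hm', rs_foldl_le_iff]
    constructor
    · rintro (h | ⟨l, hl, hr⟩)
      · omega
      · exact ⟨l, hl, ((rsRank_le_iff _).2.1).mp hr⟩
    · rintro ⟨l, hl, hr⟩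
      exact Or.inr ⟨l, hl, ((rsRank_le_iff _).2.1).mpr hr⟩
  have h2 : m ≤ 2 ↔ ∃ l ∈ lines, rsGetC l = some "low" ∨ rsGetC l = some "medium" ∨ rsGetC l = some "none" := by
    rw [hm', rs_foldl_le_iff]
    constructor
    · rintro (h | ⟨l, hl, hr⟩)
      · omega
      · exact ⟨l, hl, ((rsRank_le_iff _).2.2).mp hr⟩
    · rintro ⟨l, hl, hr⟩
      exact Or.inr ⟨l, hl, ((rsRank_le_iff _).2.2).mpr hr⟩
  have hnn : 0 ≤ m := by rw [hm']; exact rs_foldl_nonneg _ _ (by omega)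
  rw [rs_inv_getD]
  simp only [rsGetC] at h0 h1 h2
  by_cases hlow : ∃ l ∈ lines, (PySem.Dict.mk l).get? "relationshipCertainty" = some "low"
  · have hm0 : m = 0 := le_antisymm (h0.mpr hlow) hnn
    simp [hlow, hm0]
  · by_cases hmed : ∃ l ∈ lines, (PySem.Dict.mk l).get? "relationshipCertainty" = some "medium"
    · have hm1 : m = 1 := by
        have hle : m ≤ 1 := h1.mpr (hmed.elim fun l hl => ⟨l, hl.1, Or.inr hl.2⟩)
        have : ¬ m ≤ 0 := fun h => hlow (h0.mp h)
        omega
      simp [hlow, hmed, hm1]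
    · by_cases hnon : ∃ l ∈ lines, (PySem.Dict.mk l).get? "relationshipCertainty" = some "none"
      · have hm2 : m = 2 := by
          have hle : m ≤ 2 := h2.mpr (hnon.elim fun l hl => ⟨l, hl.1, Or.inr (Or.inr hl.2)⟩)
          have : ¬ m ≤ 1 := fun h => ((h1.mp h).elim fun l hl =>
            hl.2.elim (fun e => hlow ⟨l, hl.1, e⟩) (fun e => hmed ⟨l, hl.1, e⟩))
          omega
        simp [hlow, hmed, hnon, hm2]
      · have hm3 : ¬ m = 0 ∧ ¬ m = 1 ∧ ¬ m = 2 := by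
          have : ¬ m ≤ 2 := fun h => ((h2.mp h).elim fun l hl =>
            hl.2.elim (fun e => hlow ⟨l, hl.1, e⟩)
              (fun e => e.elim (fun e => hmed ⟨l, hl.1, e⟩) (fun e => hnon ⟨l, hl.1, e⟩)))
          omega
        simp [hlow, hmed, hnon, hm3.1, hm3.2.1, hm3.2.2]
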